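-- pv_equiv track=rewrite | github.com/Saba20090303/GOA | Day 88/homework/lesson88.py | like_or_dislike
-- ===== SOURCE A (Python) =====
-- def like_or_dislike(buttons):
--     states = {
--         'Like': 1,
--         'Dislike': -1,
--         'Nothing': 0
--     }
--     state = 0
--     for button in buttons:
--         if button == 'Like':
--             state += 1
--         elif button == 'Dislike':
--             state -= 1
--     if state > 0:
--         return 'Like'
--     elif state < 0:
--         return 'Dislike'
--     else:
--         return 'Nothing'
-- ===== SOURCE B (Python) =====
-- def like_or_dislike(buttons):
--     # Cancellation stack: each 'Dislike' annihilates one pending 'Like' and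
--     # vice versa; the survivors (all of one kind) decide the final state.
--     stack = []
--     for b in buttons:
--         if b not in ('Like', 'Dislike'):
--             continue
--         if stack and stack[-1] != b:
--             stack.pop()
--         else:
--             stack.append(b)
--     return stack[-1] if stack else 'Nothing'
-- ===== Notes on version B (the rewrite author's own statement) =====
-- stated objective: alternative
-- what changed: Replaced the signed counter with a cancellation stack: each vote either annihilates an opposite pending vote (pop) or is pushed, and the surviving votes' kind (or emptiness) decides the result.
import Mathlib
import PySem

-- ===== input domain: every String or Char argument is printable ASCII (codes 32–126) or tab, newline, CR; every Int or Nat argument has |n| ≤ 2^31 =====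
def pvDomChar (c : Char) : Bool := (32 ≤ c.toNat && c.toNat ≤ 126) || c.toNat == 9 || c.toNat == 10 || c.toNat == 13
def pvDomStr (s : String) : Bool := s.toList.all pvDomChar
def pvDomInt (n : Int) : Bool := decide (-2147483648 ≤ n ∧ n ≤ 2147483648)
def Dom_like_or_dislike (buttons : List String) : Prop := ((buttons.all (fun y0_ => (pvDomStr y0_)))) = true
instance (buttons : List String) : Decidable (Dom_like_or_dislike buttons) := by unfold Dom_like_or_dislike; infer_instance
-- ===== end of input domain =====

-- B replaces A's signed counter with a cancellation stack (opposite votes annihilate; survivors decide). Objective: alternative algorithm, same cost.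
-- ===== PORT A =====
def like_or_dislike (buttons : List String) : String :=
  -- the states dict is defined but never used, as in A
  let _states : PySem.Dict String Int :=
    (((PySem.Dict.empty).insert "Like" 1).insert "Dislike" (-1)).insert "Nothing" 0
  let state : Int := buttons.foldl (fun state button =>
    if button == "Like" then state + 1
    else if button == "Dislike" then state - 1
    else state) 0
  if state > 0 then "Like"
  else if state < 0 then "Dislike"
  else "Nothing"

-- ===== PORT B =====
-- one loop iteration of Source B: skip non-votes; pop an opposite top, else push
def lodStep (stack : List String) (b : String) : List String :=
  if b ≠ "Like" ∧ b ≠ "Dislike" then stack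
  else if stack ≠ [] ∧ stack.getLast? ≠ some b then stack.dropLast
  else stack ++ [b]

def like_or_dislike_alt (buttons : List String) : String :=
  let stack := buttons.foldl lodStep []
  -- 'stack[-1] if stack else "Nothing"': getLast? is none exactly when stack is empty
  (stack.getLast?).getD "Nothing"

-- ===== PRECONDITION & SPEC =====
def Spec_like_or_dislike (buttons : List String) (out : String) : Prop := out = like_or_dislike_alt buttons
instance (buttons : List String) (out : String) : Decidable (Spec_like_or_dislike buttons out) := by unfold Spec_like_or_dislike; infer_instance

-- ===== CLAIM (what is proved, stated in full; the proofs are below) =====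
def Claim_equal_like_or_dislike : Prop := ∀ (buttons : List String), Dom_like_or_dislike buttons → Spec_like_or_dislike buttons (like_or_dislike buttons)

-- ===== LEMMAS AND PROOFS =====

-- canonical stack holding a net tally k: k Likes if k ≥ 0, (-k) Dislikes otherwise
def lodStackOf (k : Int) : List String :=
  if 0 ≤ k then List.replicate k.toNat "Like" else List.replicate (-k).toNat "Dislike"

theorem lodStep_like (k : Int) : lodStep (lodStackOf k) "Like" = lodStackOf (k + 1) := by
  unfold lodStep lodStackOf
  rw [if_neg (by simp)]
  by_cases hk : 0 ≤ k
  · -- top (if any) is "Like": push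
    have hcond : ¬ ((List.replicate k.toNat ("Like" : String) ≠ []) ∧
        (List.replicate k.toNat ("Like" : String)).getLast? ≠ some "Like") := by
      rcases Nat.eq_zero_or_pos k.toNat with h0 | hpos
      · simp [h0]
      · have : (List.replicate k.toNat ("Like" : String)).getLast? = some "Like" := by
          rw [List.getLast?_replicate]; simp [Nat.pos_iff_ne_zero.mp hpos]
        simp [this]
    have ht : (k + 1).toNat = k.toNat + 1 := by omega
    rw [if_pos hk, if_neg hcond, if_pos (by omega : (0:Int) ≤ k + 1), ht, List.replicate_succ']
  · -- stack is nonempty Dislikes: pop one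
    have hm : (-k).toNat ≠ 0 := by omega
    have hcond : (List.replicate (-k).toNat ("Dislike" : String) ≠ []) ∧
        (List.replicate (-k).toNat ("Dislike" : String)).getLast? ≠ some "Like" := by
      constructor
      · simp [List.replicate_eq_nil_iff, hm]
      · rw [List.getLast?_replicate]; simp [hm]
    rw [if_neg hk, if_pos hcond]
    by_cases hk1 : 0 ≤ k + 1
    · have hk0 : k + 1 = 0 := by omega
      have h1 : (-k).toNat = 1 := by omega
      rw [if_pos hk1, hk0, h1]
      simp
    · have ht : (-k).toNat = (-(k + 1)).toNat + 1 := by omega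
      rw [if_neg hk1, ht, List.replicate_succ', List.dropLast_concat]

theorem lodStep_dislike (k : Int) : lodStep (lodStackOf k) "Dislike" = lodStackOf (k - 1) := by
  unfold lodStep lodStackOf
  rw [if_neg (by simp)]
  by_cases hk : 0 < k
  · -- stack is nonempty Likes: pop one
    have hm : k.toNat ≠ 0 := by omega
    have hcond : (List.replicate k.toNat ("Like" : String) ≠ []) ∧
        (List.replicate k.toNat ("Like" : String)).getLast? ≠ some "Dislike" := by
      constructor
      · simp [List.replicate_eq_nil_iff, hm]
      · rw [List.getLast?_replicate]; simp [hm]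
    have ht : k.toNat = (k - 1).toNat + 1 := by omega
    rw [if_pos (by omega : (0:Int) ≤ k), if_pos hcond, if_pos (by omega : (0:Int) ≤ k - 1),
      ht, List.replicate_succ', List.dropLast_concat]
  · -- top (if any) is "Dislike": push
    have hcond : ¬ ((lodStackOf k ≠ []) ∧ (lodStackOf k).getLast? ≠ some "Dislike") := by
      unfold lodStackOf
      by_cases h0 : k = 0
      · simp [h0]
      · have hneg : ¬ (0:Int) ≤ k := by omega
        have hm : (-k).toNat ≠ 0 := by omega
        rw [if_neg hneg]
        have : (List.replicate (-k).toNat ("Dislike" : String)).getLast? = some "Dislike" := by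
          rw [List.getLast?_replicate]; simp [hm]
        simp [this]
    unfold lodStackOf at hcond
    have ht : (-(k - 1)).toNat = (-k).toNat + 1 := by omega
    by_cases h0 : k = 0
    · subst h0
      simp [List.replicate_succ']
    · have hneg : ¬ (0:Int) ≤ k := by omega
      rw [if_neg hneg] at hcond ⊢
      rw [if_neg hcond, if_neg (by omega : ¬ (0:Int) ≤ k - 1), ht, List.replicate_succ']

theorem lodStep_other (s : List String) (b : String) (hL : b ≠ "Like") (hD : b ≠ "Dislike") :
    lodStep s b = s := by
  unfold lodStep
  rw [if_pos ⟨hL, hD⟩]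

-- the folded stack is always the canonical stack of A's running tally
theorem lodFold_eq (buttons : List String) (k : Int) :
    buttons.foldl lodStep (lodStackOf k)
      = lodStackOf (buttons.foldl (fun state button =>
          if button == "Like" then state + 1
          else if button == "Dislike" then state - 1
          else state) k) := by
  induction buttons generalizing k with
  | nil => rfl
  | cons b bs ih =>
    rw [List.foldl_cons, List.foldl_cons]
    by_cases hL : b = "Like"
    · rw [hL, lodStep_like, ih]; simp
    · by_cases hD : b = "Dislike"
      · rw [hD, lodStep_dislike, ih]; simp
      · rw [lodStep_other _ _ hL hD, ih]; simp [hL, hD]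

theorem lodStackOf_getLast (k : Int) :
    ((lodStackOf k).getLast?).getD "Nothing"
      = if k > 0 then "Like" else if k < 0 then "Dislike" else "Nothing" := by
  unfold lodStackOf
  rcases lt_trichotomy k 0 with h | h | h
  · have hm : (-k).toNat ≠ 0 := by omega
    have h1 : ¬ (0:Int) ≤ k := by omega
    have h2 : ¬ k > 0 := by omega
    rw [if_neg h1, List.getLast?_replicate, if_neg h2, if_pos h]
    simp [hm]
  · subst h; simp
  · have hm : k.toNat ≠ 0 := by omega
    rw [if_pos (by omega), List.getLast?_replicate, if_pos h]
    simp [hm]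

-- ===== VERDICT (by name: the statement is the Claim_ definition above) =====
theorem like_or_dislike_spec : Claim_equal_like_or_dislike := by
  intro buttons _
  unfold Spec_like_or_dislike like_or_dislike like_or_dislike_alt
  have h0 : ([] : List String) = lodStackOf 0 := by simp [lodStackOf]
  rw [h0, lodFold_eq, lodStackOf_getLast]
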